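-- pv_equiv track=rewrite | github.com/cwaltz/EPIJudge | epi_judge_python/refueling_schedule.py | find_ample_city_alternate
-- ===== SOURCE A (Python) =====
-- import collections
-- from typing import List
--
-- MPG = 20
--
-- def find_ample_city_alternate(gallons: List[int], distances: List[int]) -> int:
--     """
--     Test PASSED (202/202) [   1 ms]
--     Average running time:   70 us
--     Median running time:    45 us
--     """
--     remaining_gallons = 0
--     CityAndRemainingGas = collections.namedtuple('CityAndRemainingGas',
--                                                  ('city', 'remaining_gallons'))
--     city_remaining_gallons_pair = CityAndRemainingGas(0, 0)
--     num_cities = len(gallons)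
--     for i in range(1, num_cities):
--         remaining_gallons += gallons[i - 1] - distances[i - 1] // MPG
--         if remaining_gallons < city_remaining_gallons_pair.remaining_gallons:
--             city_remaining_gallons_pair = CityAndRemainingGas(
--                 i, remaining_gallons)
--     return city_remaining_gallons_pair.city
-- ===== SOURCE B (Python) =====
-- MPG = 20
--
-- def find_ample_city_alternate(gallons, distances):
--     n = len(gallons)
--     if n == 0:
--         return 0
--     prefix = [0]
--     for i in range(1, n):
--         prefix.append(prefix[-1] + gallons[i - 1] - distances[i - 1] // MPG)
--     return min(range(n), key=prefix.__getitem__)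
-- ===== Notes on version B (the rewrite author's own statement) =====
-- stated objective: alternative
-- what changed: Replaces A's single-pass loop with a running-minimum namedtuple state by a two-phase decomposition: build the prefix array of remaining gallons, then take the earliest argmin with min(range(n), key=prefix.__getitem__).
import Mathlib
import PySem

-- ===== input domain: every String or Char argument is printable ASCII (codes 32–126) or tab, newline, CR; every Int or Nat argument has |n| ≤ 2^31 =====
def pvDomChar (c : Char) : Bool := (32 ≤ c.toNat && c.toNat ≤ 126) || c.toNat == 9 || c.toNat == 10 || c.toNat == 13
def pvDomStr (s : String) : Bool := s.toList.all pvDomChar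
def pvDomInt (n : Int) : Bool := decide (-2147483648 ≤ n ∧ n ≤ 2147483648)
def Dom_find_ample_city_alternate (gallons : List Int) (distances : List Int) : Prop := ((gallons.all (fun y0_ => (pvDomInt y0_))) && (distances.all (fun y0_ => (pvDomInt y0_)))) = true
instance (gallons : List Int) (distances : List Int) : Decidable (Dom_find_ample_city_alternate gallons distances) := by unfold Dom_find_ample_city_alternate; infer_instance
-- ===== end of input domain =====

-- B replaces A's single-pass running-minimum state machine by a prefix-sum array
-- followed by an earliest-index argmin (objective: alternative decomposition, same O(n) cost).

-- ===== PORT A =====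
-- state: (remaining_gallons, city, best_remaining); pyGetD is exact inside Pre_,
-- where every index Python touches is in range.
def find_ample_city_alternate (gallons : List Int) (distances : List Int) : Int :=
  let num_cities : Int := (gallons.length : Int)
  let s := (PySem.List.pyRange 1 num_cities 1).foldl
    (fun (st : Int × Int × Int) i =>
      let rem := st.1 + PySem.List.pyGetD gallons (i - 1) 0
                   - PySem.Int.floordiv (PySem.List.pyGetD distances (i - 1) 0) 20
      if rem < st.2.2 then (rem, i, rem) else (rem, st.2.1, st.2.2))
    (0, 0, 0)
  s.2.1

-- ===== PORT B =====
-- prefix[-1] is PySem.List.pyGetD acc (-1); min(range(n), key=prefix.__getitem__) is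
-- PySem.List.min? (first minimal element, as Python's min); n > 0 there, so the
-- 'none' arm (Python would raise on an empty range) is unreachable.
def find_ample_city_alternate_alt (gallons : List Int) (distances : List Int) : Int :=
  let n : Int := (gallons.length : Int)
  if n == 0 then 0
  else
    let pref := (PySem.List.pyRange 1 n 1).foldl
      (fun acc i => acc ++ [PySem.List.pyGetD acc (-1) 0 + PySem.List.pyGetD gallons (i - 1) 0
          - PySem.Int.floordiv (PySem.List.pyGetD distances (i - 1) 0) 20]) [0]
    match PySem.List.min? (PySem.List.pyRange 0 n 1) (fun i => PySem.List.pyGetD pref i 0) with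
    | some m => m
    | none => 0

-- ===== PRECONDITION & SPEC =====
-- Pre_ excludes exactly the inputs on which Python A raises IndexError:
-- the loop reads distances[i-1] for i in 1..len(gallons)-1.
def Pre_find_ample_city_alternate (gallons : List Int) (distances : List Int) : Prop :=
  gallons.length ≤ distances.length + 1
instance (gallons : List Int) (distances : List Int) : Decidable (Pre_find_ample_city_alternate gallons distances) := by unfold Pre_find_ample_city_alternate; infer_instance

def pvWitness_find_ample_city_alternate : List Int × List Int := ([10, 5, 25], [400, 20, 40])

def Spec_find_ample_city_alternate (gallons : List Int) (distances : List Int) (out : Int) : Prop := out = find_ample_city_alternate_alt gallons distances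
instance (gallons : List Int) (distances : List Int) (out : Int) : Decidable (Spec_find_ample_city_alternate gallons distances out) := by unfold Spec_find_ample_city_alternate; infer_instance

-- ===== CLAIM (what is proved, stated in full; the proofs are below) =====
def Claim_equal_find_ample_city_alternate : Prop := ∀ (gallons : List Int) (distances : List Int), Dom_find_ample_city_alternate gallons distances → Pre_find_ample_city_alternate gallons distances → Spec_find_ample_city_alternate gallons distances (find_ample_city_alternate gallons distances)

-- ===== LEMMAS AND PROOFS =====

-- the common prefix function: P k = remaining gallons on arriving at city k
def pvP (g d : List Int) : Nat → Int
  | 0 => 0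
  | k + 1 => pvP g d k + PySem.List.pyGetD g (k : Int) 0
               - PySem.Int.floordiv (PySem.List.pyGetD d (k : Int) 0) 20

-- the pure earliest-argmin fold (the shape shared by A's loop and min?)
def pvMF (g d : List Int) (L : List Int) (c : Int) : Int :=
  L.foldl (fun m i => if pvP g d i.toNat < pvP g d m.toNat then i else m) c

lemma pvP_succ_int (g d : List Int) (a : Nat) (h : 1 ≤ a) :
    pvP g d (a - 1) + PySem.List.pyGetD g ((a : Int) - 1) 0
      - PySem.Int.floordiv (PySem.List.pyGetD d ((a : Int) - 1) 0) 20 = pvP g d a := by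
  obtain ⟨k, rfl⟩ : ∃ k, a = k + 1 := ⟨a - 1, by omega⟩
  have : ((k + 1 : Nat) : Int) - 1 = (k : Int) := by push_cast; ring
  simp [pvP]

-- A's fold, started with remaining = P (a-1) and any (city, best = P city) pair,
-- computes the earliest argmin over the rest of the range.
lemma foldA_eq (g d : List Int) (n : Int) :
    ∀ (fuel : Nat) (a : Nat), 1 ≤ a → n ≤ (a : Int) + fuel → ∀ c : Int,
      ((PySem.List.pyRange (a : Int) n 1).foldl
        (fun (st : Int × Int × Int) i =>
          let rem := st.1 + PySem.List.pyGetD g (i - 1) 0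
                       - PySem.Int.floordiv (PySem.List.pyGetD d (i - 1) 0) 20
          if rem < st.2.2 then (rem, i, rem) else (rem, st.2.1, st.2.2))
        (pvP g d (a - 1), c, pvP g d c.toNat)).2.1 = pvMF g d (PySem.List.pyRange (a : Int) n 1) c := by
  intro fuel
  induction fuel with
  | zero =>
    intro a _ hle c
    rw [PySem.List.pyRange_one_eq_nil (by omega)]
    simp [pvMF]
  | succ m ih =>
    intro a ha hle c
    by_cases hlt : (a : Int) < n
    · rw [PySem.List.pyRange_one_cons hlt]
      simp only [List.foldl_cons, pvMF]
      rw [pvP_succ_int g d a ha]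
      have hta : ((a : Int)).toNat = a := by omega
      have hcast : ((a : Int)) + 1 = ((a + 1 : Nat) : Int) := by push_cast; ring
      by_cases hc : pvP g d a < pvP g d c.toNat
      · simp only [hta, hc]
        have := ih (a + 1) (by omega) (by push_cast; omega) (a : Int)
        rw [hcast] at *
        simpa [pvMF, hta, Nat.add_sub_cancel] using this
      · simp only [hta, hc]
        have := ih (a + 1) (by omega) (by push_cast; omega) c
        rw [hcast] at *
        simpa [pvMF, Nat.add_sub_cancel] using this
    · rw [PySem.List.pyRange_one_eq_nil (by omega)]
      simp [pvMF]

-- min?'s internal fold over 'some' is the pure argmin fold, for any key that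
-- agrees with pvP on the elements scanned
lemma min?_some_fold (g d : List Int) (key : Int → Int) (L : List Int) :
    ∀ c : Int, key c = pvP g d c.toNat → (∀ x ∈ L, key x = pvP g d x.toNat) →
      L.foldl (fun acc x =>
          match acc with
          | none => some x
          | some m => if key x < key m then some x else some m)
        (some c) = some (pvMF g d L c) := by
  induction L with
  | nil => intro c _ _; simp [pvMF]
  | cons x t ih =>
    intro c hc hL
    have hx : key x = pvP g d x.toNat := hL x (by simp)
    have ht : ∀ y ∈ t, key y = pvP g d y.toNat := fun y hy => hL y (by simp [hy])
    simp only [List.foldl_cons, pvMF, hc, hx]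
    by_cases h : pvP g d x.toNat < pvP g d c.toNat
    · simp only [if_pos h]; simpa [pvMF] using ih x hx ht
    · simp only [if_neg h]; simpa [pvMF] using ih c hc ht

lemma min?_cons (g d : List Int) (key : Int → Int) (c : Int) (L : List Int)
    (hc : key c = pvP g d c.toNat) (hL : ∀ x ∈ L, key x = pvP g d x.toNat) :
    PySem.List.min? (c :: L) key = some (pvMF g d L c) := by
  unfold PySem.List.min?
  simp only [List.foldl_cons]
  rw [← min?_some_fold g d key L c hc hL]
  congr 1
  funext acc x
  cases acc <;> rfl

-- the prefix list B builds is the map of pvP over range n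
lemma prefix_eq (g d : List Int) (n : Nat) :
    ∀ (fuel : Nat) (a : Nat), 1 ≤ a → a ≤ n → n ≤ a + fuel →
      ((PySem.List.pyRange (a : Int) (n : Int) 1).foldl
        (fun acc i => acc ++ [PySem.List.pyGetD acc (-1) 0 + PySem.List.pyGetD g (i - 1) 0
            - PySem.Int.floordiv (PySem.List.pyGetD d (i - 1) 0) 20])
        ((List.range a).map (pvP g d))) = (List.range n).map (pvP g d) := by
  intro fuel
  induction fuel with
  | zero =>
    intro a _ han hle
    have : a = n := by omega
    subst this
    rw [PySem.List.pyRange_one_eq_nil (by omega)]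
    simp
  | succ m ih =>
    intro a ha han hle
    by_cases hlt : a < n
    · rw [PySem.List.pyRange_one_cons (by exact_mod_cast hlt)]
      simp only [List.foldl_cons]
      have hne : (List.range a).map (pvP g d) ≠ [] := by
        simp [List.map_eq_nil_iff, List.range_eq_nil]; omega
      rw [PySem.List.pyGetD_neg_one _ _ hne]
      have hlast : ((List.range a).map (pvP g d)).getLast hne = pvP g d (a - 1) := by
        obtain ⟨k, rfl⟩ : ∃ k, a = k + 1 := ⟨a - 1, by omega⟩
        rw [List.getLast_eq_getElem]
        simp [List.getElem_map]
      rw [hlast, pvP_succ_int g d a ha]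
      have happ : (List.range a).map (pvP g d) ++ [pvP g d a] = (List.range (a + 1)).map (pvP g d) := by
        rw [List.range_succ, List.map_append]; rfl
      rw [happ]
      have hcast : ((a : Int)) + 1 = ((a + 1 : Nat) : Int) := by push_cast; ring
      rw [hcast]
      exact ih (a + 1) (by omega) (by omega) (by omega)
    · have : a = n := by omega
      subst this
      rw [PySem.List.pyRange_one_eq_nil (by omega)]
      simp

-- ===== VERDICT (by name: the statement is the Claim_ definition above) =====
theorem find_ample_city_alternate_spec : Claim_equal_find_ample_city_alternate := by
  intro gallons distances _ _
  unfold Spec_find_ample_city_alternate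
  unfold find_ample_city_alternate find_ample_city_alternate_alt
  set g := gallons
  set d := distances
  by_cases hn : g.length = 0
  · simp [hn, PySem.List.pyRange]
  · have hn1 : (1 : Int) ≤ (g.length : Int) := by omega
    have hif : ((g.length : Int) == 0) = false := by
      simp only [beq_eq_false_iff_ne, ne_eq, Nat.cast_eq_zero]; exact hn
    simp only [hif, Bool.false_eq_true, if_false]
    -- B's prefix list
    have hpre : ((PySem.List.pyRange 1 (g.length : Int) 1).foldl
        (fun acc i => acc ++ [PySem.List.pyGetD acc (-1) 0 + PySem.List.pyGetD g (i - 1) 0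
            - PySem.Int.floordiv (PySem.List.pyGetD d (i - 1) 0) 20]) [0])
        = (List.range g.length).map (pvP g d) := by
      have h0 : ((List.range 1).map (pvP g d)) = [0] := by simp [pvP]
      have := prefix_eq g d g.length g.length 1 le_rfl (by omega) (by omega)
      rw [h0] at this
      exact_mod_cast this
    rw [hpre]
    -- B's key agrees with pvP on the scanned range
    have hkey : ∀ i ∈ PySem.List.pyRange 0 (g.length : Int) 1,
        PySem.List.pyGetD ((List.range g.length).map (pvP g d)) i 0 = pvP g d i.toNat := by
      intro i hi
      rw [PySem.List.mem_pyRange_one] at hi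
      obtain ⟨k, rfl⟩ : ∃ k : Nat, i = (k : Int) := ⟨i.toNat, by omega⟩
      rw [PySem.List.pyGetD_natCast, PySem.List.getD_map_range _ _ _ _ (by omega)]
      simp
    -- A's fold = earliest argmin over pyRange 1 n from city 0
    have hA := foldA_eq g d (g.length : Int) g.length 1 le_rfl (by omega) 0
    have h00 : pvP g d (0 : Int).toNat = 0 := by simp [pvP]
    rw [h00] at hA
    simp only [Nat.cast_one] at hA
    rw [show pvP g d (1 - 1) = 0 from by simp [pvP]] at hA
    rw [hA]
    -- B's min? = the same argmin
    have hcons : PySem.List.pyRange 0 (g.length : Int) 1 = 0 :: PySem.List.pyRange 1 (g.length : Int) 1 := by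
      have := PySem.List.pyRange_one_cons (a := 0) (b := (g.length : Int)) (by omega)
      simpa using this
    rw [hcons] at hkey ⊢
    have h0key : PySem.List.pyGetD ((List.range g.length).map (pvP g d)) 0 0 = pvP g d (0 : Int).toNat :=
      hkey 0 (by simp)
    rw [min?_cons g d (fun i => PySem.List.pyGetD ((List.range g.length).map (pvP g d)) i 0) 0
      (PySem.List.pyRange 1 (g.length : Int) 1) (hkey 0 (by simp))
      (fun x hx => hkey x (by simp [hx]))]
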